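-- pv_equiv track=rewrite | github.com/D1MK4real/Minimum-dominating-set-algorithm | main.py | move_set_from_FREE_to_IN
-- ===== SOURCE A (Python) =====
-- def move_set_from_FREE_to_IN(SET, graph, IN, BN, LN, FL, FREE):
--     FREE_copy = FREE.copy().difference(SET)
--     IN_copy = IN.copy().union(SET)
--     FL_copy = FL.copy()
--     BN_copy = BN.copy()
--     LN_copy = LN.copy()
--     for v in SET:
--         y = set([elem for elem in graph[v]]).intersection(FREE)
--         y2 = set([elem for elem in graph[v]]).intersection(FL)
--         FREE_copy = FREE_copy.difference(y)
--         FL_copy = FL_copy.difference(y2)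
--         BN_copy = BN_copy.union(y)
--         LN_copy = LN_copy.union(y2)
--
--     return IN_copy, BN_copy, LN_copy, FL_copy, FREE_copy
-- ===== SOURCE B (Python) =====
-- def move_set_from_FREE_to_IN(SET, graph, IN, BN, LN, FL, FREE):
--     # Classify each element directly instead of applying per-vertex set deltas:
--     # a vertex is "dominated" iff some v in SET has it as a neighbor.
--     def dominated(x):
--         return any(x in graph[v] for v in SET)
--     IN_copy = set(IN).union(SET)
--     FREE_copy = {x for x in FREE if x not in SET and not dominated(x)}
--     FL_copy = {x for x in FL if not dominated(x)}
--     stream = [w for v in SET for w in graph[v]]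
--     BN_copy = set(BN).union(w for w in stream if w in FREE)
--     LN_copy = set(LN).union(w for w in stream if w in FL)
--     return IN_copy, BN_copy, LN_copy, FL_copy, FREE_copy
-- ===== Notes on version B (the rewrite author's own statement) =====
-- stated objective: alternative
-- what changed: A applies per-vertex set deltas (intersect each graph[v] with FREE/FL, then union/difference the five state sets inside the loop); B never mutates state sets: it characterizes each output directly, classifying every element of FREE and FL by a per-element adjacency test ('is x a neighbor of some v in SET?') and filtering the flat neighbor stream once for the BN/LN additions.
import Mathlib
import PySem

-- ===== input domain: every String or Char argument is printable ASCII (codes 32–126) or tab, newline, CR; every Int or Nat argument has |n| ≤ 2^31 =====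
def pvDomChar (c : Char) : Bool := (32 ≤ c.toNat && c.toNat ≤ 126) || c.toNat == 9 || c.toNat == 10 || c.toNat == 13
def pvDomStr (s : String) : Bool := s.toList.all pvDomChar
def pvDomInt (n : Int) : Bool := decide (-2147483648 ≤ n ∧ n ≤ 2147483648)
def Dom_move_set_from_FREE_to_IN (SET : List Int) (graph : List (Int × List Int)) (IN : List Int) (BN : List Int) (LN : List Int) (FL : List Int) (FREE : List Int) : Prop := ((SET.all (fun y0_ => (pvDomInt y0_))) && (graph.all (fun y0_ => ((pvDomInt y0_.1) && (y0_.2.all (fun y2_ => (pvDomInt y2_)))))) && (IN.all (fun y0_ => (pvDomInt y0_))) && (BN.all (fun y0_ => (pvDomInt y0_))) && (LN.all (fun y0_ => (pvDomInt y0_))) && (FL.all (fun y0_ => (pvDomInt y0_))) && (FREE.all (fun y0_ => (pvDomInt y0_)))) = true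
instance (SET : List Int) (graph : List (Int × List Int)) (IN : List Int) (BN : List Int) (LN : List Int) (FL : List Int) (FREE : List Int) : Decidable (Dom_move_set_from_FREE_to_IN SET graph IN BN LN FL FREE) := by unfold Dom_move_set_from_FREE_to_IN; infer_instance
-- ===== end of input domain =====

-- ===== PORT A =====
-- B classifies every vertex of FREE/FL by a direct per-element adjacency test and filters the
-- flat neighbor stream for the BN/LN additions, instead of A's per-vertex set deltas (objective: alternative).
-- shared helper: graph[v] on a Python dict (total here; Pre_ demands v be a key)
def pvNbrs (graph : List (Int × List Int)) (v : Int) : List Int :=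
  (PySem.Dict.ofList graph).getD v []

def move_set_from_FREE_to_IN (SET : List Int) (graph : List (Int × List Int)) (IN : List Int) (BN : List Int) (LN : List Int) (FL : List Int) (FREE : List Int) : List Int × List Int × List Int × List Int × List Int :=
  let FREE_copy0 : PySem.Set Int := PySem.Set.diff (PySem.Set.ofList FREE) SET
  let IN_copy : PySem.Set Int := PySem.Set.union (PySem.Set.ofList IN) SET
  let FL_copy0 : PySem.Set Int := PySem.Set.ofList FL
  let BN_copy0 : PySem.Set Int := PySem.Set.ofList BN
  let LN_copy0 : PySem.Set Int := PySem.Set.ofList LN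
  let st := SET.foldl (fun (st : PySem.Set Int × PySem.Set Int × PySem.Set Int × PySem.Set Int) v =>
      let y : PySem.Set Int := PySem.Set.inter (PySem.Set.ofList (pvNbrs graph v)) FREE
      let y2 : PySem.Set Int := PySem.Set.inter (PySem.Set.ofList (pvNbrs graph v)) FL
      (PySem.Set.diff st.1 y, PySem.Set.diff st.2.1 y2,
       PySem.Set.union st.2.2.1 y, PySem.Set.union st.2.2.2 y2))
    (FREE_copy0, FL_copy0, BN_copy0, LN_copy0)
  (IN_copy, st.2.2.1, st.2.2.2, st.2.1, st.1)

-- ===== PORT B =====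
def move_set_from_FREE_to_IN_alt (SET : List Int) (graph : List (Int × List Int)) (IN : List Int) (BN : List Int) (LN : List Int) (FL : List Int) (FREE : List Int) : List Int × List Int × List Int × List Int × List Int :=
  let dominated : Int → Bool := fun x => SET.any (fun v => (pvNbrs graph v).contains x)
  let IN_copy : PySem.Set Int := PySem.Set.union (PySem.Set.ofList IN) SET
  let FREE_copy : PySem.Set Int :=
    PySem.Set.ofList (((PySem.Set.ofList FREE) : List Int).filter
      (fun x => !(SET.contains x) && !(dominated x)))
  let FL_copy : PySem.Set Int :=
    PySem.Set.ofList (((PySem.Set.ofList FL) : List Int).filter (fun x => !(dominated x)))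
  let stream : List Int := SET.flatMap (pvNbrs graph)
  let BN_copy : PySem.Set Int :=
    PySem.Set.union (PySem.Set.ofList BN) (stream.filter (fun w => FREE.contains w))
  let LN_copy : PySem.Set Int :=
    PySem.Set.union (PySem.Set.ofList LN) (stream.filter (fun w => FL.contains w))
  (IN_copy, BN_copy, LN_copy, FL_copy, FREE_copy)

-- ===== PRECONDITION & SPEC =====
-- Pre_ excludes exactly the inputs where Python A raises KeyError: some v in SET not a key of graph.
def Pre_move_set_from_FREE_to_IN (SET : List Int) (graph : List (Int × List Int)) (IN : List Int) (BN : List Int) (LN : List Int) (FL : List Int) (FREE : List Int) : Prop :=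
  ∀ v ∈ SET, v ∈ graph.map Prod.fst
instance (SET : List Int) (graph : List (Int × List Int)) (IN : List Int) (BN : List Int) (LN : List Int) (FL : List Int) (FREE : List Int) : Decidable (Pre_move_set_from_FREE_to_IN SET graph IN BN LN FL FREE) := by unfold Pre_move_set_from_FREE_to_IN; infer_instance

def pvWitness_move_set_from_FREE_to_IN : List Int × (List (Int × List Int)) × List Int × List Int × List Int × List Int × List Int :=
  ([0], [(0, [1, 2]), (1, [0])], [], [], [], [2], [0, 1])

def Spec_move_set_from_FREE_to_IN (SET : List Int) (graph : List (Int × List Int)) (IN : List Int) (BN : List Int) (LN : List Int) (FL : List Int) (FREE : List Int) (out : List Int × List Int × List Int × List Int × List Int) : Prop := out = move_set_from_FREE_to_IN_alt SET graph IN BN LN FL FREE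
instance (SET : List Int) (graph : List (Int × List Int)) (IN : List Int) (BN : List Int) (LN : List Int) (FL : List Int) (FREE : List Int) (out : List Int × List Int × List Int × List Int × List Int) : Decidable (Spec_move_set_from_FREE_to_IN SET graph IN BN LN FL FREE out) := by unfold Spec_move_set_from_FREE_to_IN; infer_instance

-- ===== CLAIM (what is proved, stated in full; the proofs are below) =====
def Claim_equal_move_set_from_FREE_to_IN : Prop := ∀ (SET : List Int) (graph : List (Int × List Int)) (IN : List Int) (BN : List Int) (LN : List Int) (FL : List Int) (FREE : List Int), Dom_move_set_from_FREE_to_IN SET graph IN BN LN FL FREE → Pre_move_set_from_FREE_to_IN SET graph IN BN LN FL FREE → Spec_move_set_from_FREE_to_IN SET graph IN BN LN FL FREE (move_set_from_FREE_to_IN SET graph IN BN LN FL FREE)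

-- ===== LEMMAS AND PROOFS =====

-- a fold over the 4-component state splits into four independent folds
lemma pv_fold_split (vs : List Int) (y y2 : Int → PySem.Set Int)
    (fr fl bn ln : PySem.Set Int) :
    vs.foldl (fun (st : PySem.Set Int × PySem.Set Int × PySem.Set Int × PySem.Set Int) v =>
        (PySem.Set.diff st.1 (y v), PySem.Set.diff st.2.1 (y2 v),
         PySem.Set.union st.2.2.1 (y v), PySem.Set.union st.2.2.2 (y2 v)))
      (fr, fl, bn, ln)
    = (vs.foldl (fun s v => PySem.Set.diff s (y v)) fr,
       vs.foldl (fun s v => PySem.Set.diff s (y2 v)) fl,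
       vs.foldl (fun s v => PySem.Set.union s (y v)) bn,
       vs.foldl (fun s v => PySem.Set.union s (y2 v)) ln) := by
  induction vs generalizing fr fl bn ln with
  | nil => rfl
  | cons v vs ih => simp only [List.foldl_cons]; exact ih _ _ _ _

-- iterated difference is one filter against "removed by some v"
lemma pv_foldl_diff (vs : List Int) (f : Int → PySem.Set Int) (s : PySem.Set Int) :
    vs.foldl (fun acc v => PySem.Set.diff acc (f v)) s
    = s.filter (fun x => !(vs.any (fun v => (f v).contains x))) := by
  induction vs generalizing s with
  | nil => simp
  | cons v vs ih =>
      rw [List.foldl_cons, ih]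
      simp only [PySem.Set.diff, List.filter_filter]
      apply List.filter_congr
      intro x _
      cases hc : (f v).contains x <;>
        cases hb : (vs.any (fun v => (f v).contains x)) <;>
          simp only [List.any_cons, hc, hb] <;> rfl

-- iterated union is one update with the concatenation
lemma pv_foldl_union (vs : List Int) (f : Int → List Int) (s : PySem.Set Int) :
    vs.foldl (fun acc v => PySem.Set.union acc (f v)) s
    = PySem.Set.update s (vs.flatMap f) := by
  induction vs generalizing s with
  | nil => simp [PySem.Set.update]
  | cons v vs ih => simp only [List.foldl_cons, List.flatMap_cons, PySem.Set.update_append, ih]; rfl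

-- updating with a dedup of l is updating with l
lemma pv_update_ofList (s : PySem.Set Int) (l : List Int) :
    PySem.Set.update s (PySem.Set.ofList l) = PySem.Set.update s l := by
  induction l using List.reverseRecOn with
  | nil => rfl
  | append_singleton xs x ih =>
      rw [PySem.Set.ofList_append_singleton, PySem.Set.add_eq_ite]
      by_cases hx : x ∈ PySem.Set.ofList xs
      · rw [if_pos hx, ih, PySem.Set.update_append]
        have hxs : x ∈ xs := (PySem.Set.mem_ofList _ _).1 hx
        have hmem : x ∈ PySem.Set.update s xs := (PySem.Set.mem_update _ _ _).2 (Or.inr hxs)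
        show PySem.Set.update s xs = PySem.Set.add (PySem.Set.update s xs) x
        exact (PySem.Set.add_of_mem hmem).symm
      · rw [if_neg hx, PySem.Set.update_append, PySem.Set.update_append, ih]

-- dedup commutes with filter
lemma pv_ofList_filter (p : Int → Bool) (l : List Int) :
    PySem.Set.ofList (l.filter p) = (PySem.Set.ofList l).filter p := by
  induction l using List.reverseRecOn with
  | nil => rfl
  | append_singleton xs x ih =>
      rw [List.filter_append, PySem.Set.ofList_append_singleton, PySem.Set.add_eq_ite]
      by_cases hx : x ∈ PySem.Set.ofList xs
      · rw [if_pos hx]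
        cases hpx : p x with
        | false => simpa [hpx] using ih
        | true =>
            have hx2 : x ∈ PySem.Set.ofList (xs.filter p) := by
              rw [PySem.Set.mem_ofList, List.mem_filter]
              exact ⟨(PySem.Set.mem_ofList _ _).1 hx, hpx⟩
            simp only [hpx, if_true, List.filter_cons, List.filter_nil,
                       PySem.Set.ofList_append_singleton]
            rw [← ih]
            exact PySem.Set.add_of_mem hx2
      · rw [if_neg hx]
        cases hpx : p x with
        | false => simpa [hpx] using ih
        | true =>
            have hx2 : x ∉ PySem.Set.ofList (xs.filter p) := by
              rw [PySem.Set.mem_ofList, List.mem_filter]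
              intro h
              exact hx ((PySem.Set.mem_ofList _ _).2 h.1)
            simp only [hpx, if_true, List.filter_cons, List.filter_nil,
                       PySem.Set.ofList_append_singleton, List.filter_append]
            rw [← ih]
            exact PySem.Set.add_of_not_mem hx2

-- inner dedups do not change an update with a flattened list
lemma pv_update_flatten_ofList (s : PySem.Set Int) (ls : List (List Int)) :
    PySem.Set.update s ((ls.map (fun l => PySem.Set.ofList l)).flatten)
    = PySem.Set.update s ls.flatten := by
  induction ls generalizing s with
  | nil => rfl
  | cons l ls ih =>
      simp only [List.map_cons, List.flatten_cons, PySem.Set.update_append, pv_update_ofList, ih]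

-- filter commutes with flatMap
lemma pv_filter_flatMap (p : Int → Bool) (g : Int → List Int) (vs : List Int) :
    vs.flatMap (fun v => (g v).filter p) = (vs.flatMap g).filter p := by
  induction vs with
  | nil => rfl
  | cons v vs ih => simp [List.flatMap_cons, List.filter_append, ih]

-- A's union side: fold of per-vertex unions = one union with the filtered neighbor stream
lemma pv_union_side (F : List Int) (g : Int → List Int) (vs : List Int) (s : PySem.Set Int) :
    vs.foldl (fun acc v => PySem.Set.union acc (PySem.Set.inter (PySem.Set.ofList (g v)) F)) s
    = PySem.Set.union s ((vs.flatMap g).filter (fun w => F.contains w)) := by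
  rw [pv_foldl_union]
  show PySem.Set.update s _ = PySem.Set.update s _
  have h1 : vs.flatMap (fun v => PySem.Set.inter (PySem.Set.ofList (g v)) F)
      = ((vs.map (fun v => (g v).filter (fun w => F.contains w))).map
          (fun l => PySem.Set.ofList l)).flatten := by
    simp only [List.flatMap_def, List.map_map, Function.comp_def]
    congr 1
    apply List.map_congr_left
    intro v _
    show PySem.Set.inter _ F = _
    rw [pv_ofList_filter]
    rfl
  rw [h1, pv_update_flatten_ofList, ← List.flatMap_def, pv_filter_flatMap]

-- A's diff side: fold of per-vertex differences over elements of F = one filter by the adjacency test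
lemma pv_diff_side (F : List Int) (g : Int → List Int) (vs : List Int) (s : PySem.Set Int)
    (hs : ∀ x ∈ s, x ∈ F) :
    vs.foldl (fun acc v => PySem.Set.diff acc (PySem.Set.inter (PySem.Set.ofList (g v)) F)) s
    = s.filter (fun x => !(vs.any (fun v => (g v).contains x))) := by
  rw [pv_foldl_diff]
  apply List.filter_congr
  intro x hx
  have hxF : x ∈ F := hs x hx
  congr 1
  rw [Bool.eq_iff_iff]
  simp only [List.any_eq_true, PySem.Set.contains_iff, PySem.Set.mem_inter,
             PySem.Set.mem_ofList, List.contains_iff_mem]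
  constructor
  · rintro ⟨v, hv, hg, _⟩
    exact ⟨v, hv, hg⟩
  · rintro ⟨v, hv, hg⟩
    exact ⟨v, hv, hg, hxF⟩

-- ===== VERDICT (by name: the statement is the Claim_ definition above) =====
theorem move_set_from_FREE_to_IN_spec : Claim_equal_move_set_from_FREE_to_IN := by
  intro SET graph IN BN LN FL FREE _ _
  show _ = _
  simp only [move_set_from_FREE_to_IN, move_set_from_FREE_to_IN_alt]
  rw [pv_fold_split SET
    (fun v => PySem.Set.inter (PySem.Set.ofList (pvNbrs graph v)) FREE)
    (fun v => PySem.Set.inter (PySem.Set.ofList (pvNbrs graph v)) FL)]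
  have hFREE :
      SET.foldl (fun s v => PySem.Set.diff s (PySem.Set.inter (PySem.Set.ofList (pvNbrs graph v)) FREE))
        (PySem.Set.diff (PySem.Set.ofList FREE) SET)
      = PySem.Set.ofList (((PySem.Set.ofList FREE) : List Int).filter
          (fun x => !(SET.contains x) && !(SET.any (fun v => (pvNbrs graph v).contains x)))) := by
    rw [pv_diff_side FREE (pvNbrs graph) SET _ (by
      intro x hx
      have := (PySem.Set.mem_diff _ _ _).1 hx
      exact (PySem.Set.mem_ofList _ _).1 this.1)]
    rw [PySem.Set.ofList_eq_self_of_nodup _ (List.Nodup.filter _ (PySem.Set.nodup_ofList _))]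
    show List.filter _ (List.filter _ _) = _
    rw [List.filter_filter]
    apply List.filter_congr
    intro x _
    rw [Bool.and_comm]
    rfl
  have hFL :
      SET.foldl (fun s v => PySem.Set.diff s (PySem.Set.inter (PySem.Set.ofList (pvNbrs graph v)) FL))
        (PySem.Set.ofList FL)
      = PySem.Set.ofList (((PySem.Set.ofList FL) : List Int).filter
          (fun x => !(SET.any (fun v => (pvNbrs graph v).contains x)))) := by
    rw [pv_diff_side FL (pvNbrs graph) SET _ (by
      intro x hx
      exact (PySem.Set.mem_ofList _ _).1 hx)]
    rw [PySem.Set.ofList_eq_self_of_nodup _ (List.Nodup.filter _ (PySem.Set.nodup_ofList _))]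
  rw [hFREE, hFL, pv_union_side FREE (pvNbrs graph) SET, pv_union_side FL (pvNbrs graph) SET]
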